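/- GENERATED by mk_final_copies.py from the proof of the farm's unit `neighbors` (farm:neighbors.2: Proof.lean) as the
   re-elaboration sweep compiled it — do not edit. -/
/-
  UNIT `neighbors`, PROVED (farm worker of freeze-6, attempt 1: it returned the CONTRACT-PRE problem "the case `n ≤ 0` of the pre says
  nothing about `plow` / `phigh`" together with the complete walk of the case `0 < n`; freeze-7 dropped the case `n ≤ 0` from
  `neighbors.spec.pre`). The walk is `neighbors_pos` of Lemmas.lean.
-/
import Asan.CheckWalk
import Vorbis.Spec.Units.neighbors
import Vorbis.Spec.Worked.neighbors_Lemmas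

open X86 X86.User Asan Vorbis

/-- The unit: `neighbors_pos` at every entry state that satisfies the precondition. -/
theorem Vorbis.Spec.Worked.neighbors_ok : Vorbis.Spec.neighbors.Statement := by
  intro Lay hLay μ hμ u₀ hcode hload2 hstore4 others frames u ret he hpre
  exact Vorbis.Spec.neighbors.neighbors_pos Lay hLay μ hμ u₀ hcode hload2 hstore4 others frames u ret he hpre
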